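-- pv_equiv track=rewrite | github.com/hail-is/hail | batch/batch/worker/copy_files.py | partition_boundaries
-- ===== SOURCE A (Python) =====
-- def partition_boundaries(file_size, min_partition_size, max_partitions):
--     if file_size == 0:
--         return ([0, 0], 1)
--
--     n_partitions = (file_size + min_partition_size - 1) // min_partition_size
--
--     if max_partitions:
--         n_partitions = min(max_partitions, n_partitions)
--
--     partition_size = file_size // n_partitions
--     n_partitions_w_extra_byte = file_size % n_partitions
--
--     partition_sizes = [partition_size + 1] * n_partitions_w_extra_byte + \
--                       [partition_size] * (n_partitions - n_partitions_w_extra_byte)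
--
--     pos = 0
--     boundaries = [0]
--     for size in partition_sizes:
--         pos += size
--         boundaries.append(pos)
--
--     return (boundaries, n_partitions)
-- ===== SOURCE B (Python) =====
-- def partition_boundaries(file_size, min_partition_size, max_partitions):
--     if file_size == 0:
--         return ([0, 0], 1)
--
--     n_partitions = (file_size + min_partition_size - 1) // min_partition_size
--     if max_partitions:
--         n_partitions = min(max_partitions, n_partitions)
--
--     # Greedy fair split: with k partitions left, the next one takes
--     # ceil(remaining / k) bytes; no sizes list, no extras counter.
--     boundaries = [0]
--     remaining = file_size
--     k = n_partitions
--     while k > 0: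
--         remaining -= -(-remaining // k)
--         boundaries.append(file_size - remaining)
--         k -= 1
--     return (boundaries, n_partitions)
-- ===== Notes on version B (the rewrite author's own statement) =====
-- stated objective: alternative
-- what changed: Replaces A's divmod-based extras count, materialised partition_sizes list and prefix-sum accumulator with a greedy loop that, with k partitions left, gives the next partition ceil(remaining/k) bytes and records file_size - remaining as the boundary.
import Mathlib
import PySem

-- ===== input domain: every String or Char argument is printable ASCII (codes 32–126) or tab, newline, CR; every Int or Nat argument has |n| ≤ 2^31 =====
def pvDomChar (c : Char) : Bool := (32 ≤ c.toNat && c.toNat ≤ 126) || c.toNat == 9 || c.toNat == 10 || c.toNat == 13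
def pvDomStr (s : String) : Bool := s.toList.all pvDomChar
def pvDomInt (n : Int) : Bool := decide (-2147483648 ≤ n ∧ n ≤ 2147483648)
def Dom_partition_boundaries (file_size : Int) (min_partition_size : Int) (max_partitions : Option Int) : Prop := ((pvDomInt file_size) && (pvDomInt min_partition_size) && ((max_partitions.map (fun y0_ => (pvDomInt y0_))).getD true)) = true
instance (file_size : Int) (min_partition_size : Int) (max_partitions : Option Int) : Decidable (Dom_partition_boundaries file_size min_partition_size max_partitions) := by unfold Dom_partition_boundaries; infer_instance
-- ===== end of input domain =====

-- B replaces the divmod/extras count, the materialised partition_sizes list and the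
-- prefix-sum accumulator with a greedy loop giving the next partition ceil(remaining/k) bytes.


-- ===== PORT A =====
def partition_boundaries (file_size : Int) (min_partition_size : Int) (max_partitions : Option Int) : List Int × Int :=
  if file_size = 0 then ([0, 0], 1)
  else
    let n_partitions0 : Int := PySem.Int.floordiv (file_size + min_partition_size - 1) min_partition_size
    -- `if max_partitions:` — truthy = not None and not 0
    let n_partitions : Int :=
      match max_partitions with
      | some m => if m ≠ 0 then min m n_partitions0 else n_partitions0
      | none => n_partitions0
    let partition_size := PySem.Int.floordiv file_size n_partitions
    let n_partitions_w_extra_byte := PySem.Int.mod file_size n_partitions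
    -- Python list repetition [x]*k is empty for k ≤ 0; Int.toNat clamps likewise (exact)
    let partition_sizes :=
      List.replicate n_partitions_w_extra_byte.toNat (partition_size + 1) ++
      List.replicate (n_partitions - n_partitions_w_extra_byte).toNat partition_size
    let st := partition_sizes.foldl
      (fun (st : Int × List Int) size => (st.1 + size, st.2 ++ [st.1 + size]))
      (0, [0])
    (st.2, n_partitions)

-- ===== PORT B =====
-- the `while k > 0` loop of Source B: remaining -= ceil(remaining / k); append file_size - remaining.
-- `fuel` only bounds the recursion (the loop runs exactly k.toNat times); the while-condition
-- `0 < k` is tested inside, as in Source B.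
def pbLoopAux (file_size : Int) (fuel : Nat) (k : Int) (remaining : Int) (boundaries : List Int) : List Int :=
  match fuel with
  | 0 => boundaries
  | fuel' + 1 =>
    if 0 < k then
      let remaining' := remaining - (-(PySem.Int.floordiv (-remaining) k))
      pbLoopAux file_size fuel' (k - 1) remaining' (boundaries ++ [file_size - remaining'])
    else boundaries

def pbLoop (file_size : Int) (k : Int) (remaining : Int) (boundaries : List Int) : List Int :=
  pbLoopAux file_size k.toNat k remaining boundaries

def partition_boundaries_alt (file_size : Int) (min_partition_size : Int) (max_partitions : Option Int) : List Int × Int :=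
  if file_size = 0 then ([0, 0], 1)
  else
    let n_partitions0 : Int := PySem.Int.floordiv (file_size + min_partition_size - 1) min_partition_size
    let n_partitions : Int :=
      match max_partitions with
      | some m => if m ≠ 0 then min m n_partitions0 else n_partitions0
      | none => n_partitions0
    (pbLoop file_size n_partitions file_size [0], n_partitions)

-- ===== PRECONDITION & SPEC =====
-- Pre_ excludes exactly the inputs where A raises ZeroDivisionError:
-- min_partition_size = 0, or the computed n_partitions = 0 (used as divisor).
def Pre_partition_boundaries (file_size : Int) (min_partition_size : Int) (max_partitions : Option Int) : Prop :=
  file_size = 0 ∨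
    (min_partition_size ≠ 0 ∧
      (match max_partitions with
        | some m => if m ≠ 0 then min m (PySem.Int.floordiv (file_size + min_partition_size - 1) min_partition_size)
                    else PySem.Int.floordiv (file_size + min_partition_size - 1) min_partition_size
        | none => PySem.Int.floordiv (file_size + min_partition_size - 1) min_partition_size) ≠ 0)

instance (file_size : Int) (min_partition_size : Int) (max_partitions : Option Int) : Decidable (Pre_partition_boundaries file_size min_partition_size max_partitions) := by unfold Pre_partition_boundaries; infer_instance

def pvWitness_partition_boundaries : Int × Int × Option Int := (10, 3, some 2)

def Spec_partition_boundaries (file_size : Int) (min_partition_size : Int) (max_partitions : Option Int) (out : List Int × Int) : Prop := out = partition_boundaries_alt file_size min_partition_size max_partitions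
instance (file_size : Int) (min_partition_size : Int) (max_partitions : Option Int) (out : List Int × Int) : Decidable (Spec_partition_boundaries file_size min_partition_size max_partitions out) := by unfold Spec_partition_boundaries; infer_instance

-- ===== CLAIM (what is proved, stated in full; the proofs are below) =====
def Claim_equal_partition_boundaries : Prop := ∀ (file_size : Int) (min_partition_size : Int) (max_partitions : Option Int), Dom_partition_boundaries file_size min_partition_size max_partitions → Pre_partition_boundaries file_size min_partition_size max_partitions → Spec_partition_boundaries file_size min_partition_size max_partitions (partition_boundaries file_size min_partition_size max_partitions)

-- ===== LEMMAS AND PROOFS =====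

-- A's fold over a replicate block appends the prefix sums p + (k+1)*x
theorem pv_foldl_replicate (n : Nat) (x p : Int) (acc : List Int) :
    (List.replicate n x).foldl
      (fun (st : Int × List Int) size => (st.1 + size, st.2 ++ [st.1 + size])) (p, acc) =
    (p + n * x, acc ++ (List.range n).map (fun (k : Nat) => p + ((k : Int) + 1) * x)) := by
  induction n generalizing p acc with
  | zero => simp
  | succ n ih =>
    rw [List.replicate_succ, List.foldl_cons, ih, List.range_succ_eq_map]
    rw [Prod.mk.injEq]
    refine ⟨by push_cast; ring, ?_⟩
    rw [List.append_assoc, List.singleton_append, List.map_cons, List.map_map]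
    congr 1
    congr 1
    · push_cast; ring
    · apply List.map_congr_left; intro k _; simp only [Function.comp]; push_cast; ring

-- the non-trivial branch of A: its fold over the two replicate blocks equals a closed form
theorem pv_core (fs np : Int) (hnp : np ≠ 0) :
    ((List.replicate (PySem.Int.mod fs np).toNat (PySem.Int.floordiv fs np + 1) ++
       List.replicate (np - PySem.Int.mod fs np).toNat (PySem.Int.floordiv fs np)).foldl
        (fun (st : Int × List Int) size => (st.1 + size, st.2 ++ [st.1 + size]))
        ((0 : Int), [(0 : Int)])).2
    = [0] ++ (PySem.List.pyRange 1 (np + 1) 1).map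
        (fun i => i * PySem.Int.floordiv fs np + min i (PySem.Int.mod fs np)) := by
  set ps := PySem.Int.floordiv fs np with hps
  set ex := PySem.Int.mod fs np with hex
  rcases lt_or_gt_of_ne hnp with hneg | hpos
  · -- np < 0: both replicate counts clamp to 0 and the range is empty
    have hb := PySem.Int.mod_neg_bounds (a := fs) hneg
    rw [← hex] at hb
    have h1 : ex.toNat = 0 := by omega
    have h2 : (np - ex).toNat = 0 := by omega
    rw [h1, h2, PySem.List.pyRange_one_eq_nil (by omega)]
    simp
  · -- np > 0: 0 ≤ ex < np
    have hge := PySem.Int.mod_nonneg (a := fs) hpos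
    have hlt := PySem.Int.mod_lt (a := fs) hpos
    rw [← hex] at hge hlt
    rw [List.foldl_append, pv_foldl_replicate, pv_foldl_replicate,
        PySem.List.pyRange_one]
    have hsplit : (np + 1 - 1).toNat = ex.toNat + (np - ex).toNat := by omega
    rw [hsplit, List.range_add, List.map_append, List.map_append, List.map_map,
        List.map_map]
    simp only [List.append_assoc]
    congr 1
    congr 1
    · apply List.map_congr_left
      intro k hk
      have hk' : (k : Int) < ex := by
        rw [List.mem_range] at hk; omega
      simp only [Function.comp]
      have hm : min (1 + (k : Int)) ex = 1 + k := by omega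
      rw [hm]; ring
    · rw [List.map_map]
      apply List.map_congr_left
      intro k hk
      have hkb : (k : Int) < np - ex := by
        rw [List.mem_range] at hk; omega
      simp only [Function.comp]
      have hexn : ((ex.toNat : Int)) = ex := by omega
      push_cast
      rw [hexn]
      have hm : min (1 + (ex + (k : Int))) ex = ex := by omega
      rw [hm]; ring

-- B's greedy loop in closed form: with k partitions left and remaining = k*q + m bytes
-- (0 ≤ m ≤ k), the appended boundaries are fs - ((k-1-j)*q + max (m-1-j) 0) for j < k
theorem pbLoop_closed (fs q : Int) : ∀ (kn : Nat) (k m : Int) (acc : List Int),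
    k = kn → 0 ≤ m → m ≤ k →
    pbLoopAux fs kn k (k * q + m) acc =
      acc ++ (List.range kn).map
        (fun (j : Nat) => fs - ((k - 1 - (j : Int)) * q + max (m - 1 - (j : Int)) 0)) := by
  intro kn
  induction kn with
  | zero =>
    intro k m acc _ _ _
    simp [pbLoopAux]
  | succ kn ih =>
    intro k m acc hk hm0 hmk
    have hkpos : 0 < k := by omega
    simp only [pbLoopAux, if_pos hkpos]
    have hchunk : -(PySem.Int.floordiv (-(k * q + m)) k) = q + (if 0 < m then 1 else 0) := by
      rw [PySem.Int.neg_floordiv_neg_eq_iff_of_pos hkpos]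
      split_ifs with hm <;> constructor <;> nlinarith
    have hrem : k * q + m - (-(PySem.Int.floordiv (-(k * q + m)) k))
        = (k - 1) * q + max (m - 1) 0 := by
      rw [hchunk]
      split_ifs with hm
      · have h1 : max (m - 1) 0 = m - 1 := by omega
        rw [h1]; ring
      · have h1 : m = 0 := by omega
        subst h1
        have h2 : max ((0 : Int) - 1) 0 = 0 := by norm_num
        rw [h2]; ring
    simp only [hrem]
    rw [ih (k - 1) (max (m - 1) 0) _ (by omega) (by omega) (by omega)]
    rw [List.range_succ_eq_map, List.map_cons, List.map_map, List.append_assoc,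
        List.singleton_append]
    congr 1
    congr 1
    · norm_num
    · apply List.map_congr_left
      intro j _
      simp only [Function.comp]
      have h1 : max (max (m - 1) 0 - 1 - (j : Int)) 0 = max (m - 1 - ((j : Int) + 1)) 0 := by
        omega
      push_cast
      rw [h1]
      ring_nf

-- the two non-trivial branches agree: A's fold result = B's greedy loop result
theorem pv_branch (fs np : Int) (hnp : np ≠ 0) :
    ((List.replicate (PySem.Int.mod fs np).toNat (PySem.Int.floordiv fs np + 1) ++
       List.replicate (np - PySem.Int.mod fs np).toNat (PySem.Int.floordiv fs np)).foldl
        (fun (st : Int × List Int) size => (st.1 + size, st.2 ++ [st.1 + size]))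
        ((0 : Int), [(0 : Int)])).2
    = pbLoop fs np fs [0] := by
  rw [pv_core fs np hnp]
  set q := PySem.Int.floordiv fs np with hq
  set r := PySem.Int.mod fs np with hr
  rcases lt_or_gt_of_ne hnp with hneg | hpos
  · -- np < 0: both sides are [0]
    rw [PySem.List.pyRange_one_eq_nil (by omega)]
    unfold pbLoop
    rw [show np.toNat = 0 from by omega]
    simp [pbLoopAux]
  · -- np > 0
    have hge := PySem.Int.mod_nonneg (a := fs) hpos
    have hlt := PySem.Int.mod_lt (a := fs) hpos
    rw [← hr] at hge hlt
    have hfs : fs = np * q + r := by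
      have := PySem.Int.floordiv_mul_add_mod fs np
      rw [← hq, ← hr] at this; linarith
    unfold pbLoop
    rw [hfs]
    rw [pbLoop_closed (np * q + r) q np.toNat np r [0] (by omega) hge (by omega)]
    rw [PySem.List.pyRange_one, List.map_map]
    have hsplit : (np + 1 - 1).toNat = np.toNat := by omega
    rw [hsplit]
    congr 1
    apply List.map_congr_left
    intro j hj
    rw [List.mem_range] at hj
    have hjn : (j : Int) < np := by omega
    simp only [Function.comp]
    have h1 : max (r - 1 - (j : Int)) 0 = r - min (1 + (j : Int)) r := by omega
    rw [h1]
    ring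

-- ===== VERDICT =====
theorem partition_boundaries_spec : Claim_equal_partition_boundaries := by
  intro fs mps mp _ hpre
  unfold Spec_partition_boundaries
  by_cases h0 : fs = 0
  · simp [partition_boundaries, partition_boundaries_alt, h0]
  rcases hpre with h | ⟨_, hnp⟩
  · exact absurd h h0
  simp only [partition_boundaries, partition_boundaries_alt, if_neg h0]
  exact Prod.ext (pv_branch fs _ hnp) rfl
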